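-- pv_equiv track=rewrite | github.com/GRMCB/python_scripts | IPAddressCalculator/IpAddressCalculator.py | getRequiredSubnetMask
-- ===== SOURCE A (Python) =====
-- def getRequiredSubnetMask(reqNumHosts):
--     hostBits = 1
--     numOfHosts = 0
--     initialOneBits = 32
--     SubnetMaskBinary = []
--     newSubnetMaskBinary = []
--     SubnetMaskBinaryStr = ""
--     decimalMaskList = []
--     validSubnetMasks = {"11111111": 255 , "11111110": 254 , "11111100": 252 , "11111000": 248 , "11110000": 240 , "11100000": 224 , "11000000": 192 , "10000000": 128 , "00000000": 0}
--
--     for num in range(1,32):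
--         numOfHosts = 2**hostBits
--
--         if numOfHosts >= int(reqNumHosts):
--             break
--
--         hostBits += 1
--
--     newOneBits = initialOneBits - hostBits
--
--     count = 1
--     while count <=  newOneBits:
--         SubnetMaskBinary.append("1")
--
--         count += 1
--
--     count = 1
--     while count <= hostBits:
--         SubnetMaskBinary.append("0")
--         count += 1
--
--     SubnetMaskBinaryStr = "".join(SubnetMaskBinary)
--
--     newSubnetMaskBinary.append(SubnetMaskBinaryStr[0:8])
--     newSubnetMaskBinary.append(SubnetMaskBinaryStr[8:16])
--     newSubnetMaskBinary.append(SubnetMaskBinaryStr[16:24])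
--     newSubnetMaskBinary.append(SubnetMaskBinaryStr[24:32])
--
--     for octet in newSubnetMaskBinary:
--
--         if octet in validSubnetMasks:
--             decimalMaskList.append(validSubnetMasks.get(octet))
--
--     subnetString = [str(decimalMaskList[x]) for x in range(len(decimalMaskList))]
--
--     return subnetString
-- ===== SOURCE B (Python) =====
-- def getRequiredSubnetMask(reqNumHosts):
--     r = int(reqNumHosts)
--     hostBits = 1 if r < 2 else min(32, (r - 1).bit_length())
--     mask = ((1 << (32 - hostBits)) - 1) << hostBits
--     return [str((mask >> shift) & 255) for shift in (24, 16, 8, 0)]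
-- ===== Notes on version B (the rewrite author's own statement) =====
-- stated objective: idiomatic
-- what changed: Replaces the linear trial loop, binary-string building, octet slicing and dict lookup with a closed-form hostBits via (r-1).bit_length() and plain integer bit arithmetic extracting the four mask octets by shift-and-mask.
import Mathlib
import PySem

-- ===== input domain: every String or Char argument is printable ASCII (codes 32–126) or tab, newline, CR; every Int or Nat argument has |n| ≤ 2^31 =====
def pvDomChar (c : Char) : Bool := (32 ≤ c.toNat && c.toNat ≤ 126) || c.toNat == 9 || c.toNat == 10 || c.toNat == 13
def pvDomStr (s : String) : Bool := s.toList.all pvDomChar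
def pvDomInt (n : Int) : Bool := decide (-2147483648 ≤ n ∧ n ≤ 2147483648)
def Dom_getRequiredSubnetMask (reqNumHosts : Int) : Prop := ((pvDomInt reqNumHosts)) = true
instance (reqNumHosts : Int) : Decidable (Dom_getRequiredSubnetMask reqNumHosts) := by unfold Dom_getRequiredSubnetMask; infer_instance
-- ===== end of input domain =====

-- B replaces A's binary-string build + octet slicing + dict lookup by a closed-form hostBits
-- (bit_length) and integer bit arithmetic on the 32-bit mask; same return value on the whole domain.

-- ===== PORT A =====
-- the `for num in range(1,32)` search with `break`: state is hostBits
def pvLoopA (r : Int) : List Int → Nat → Nat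
  | [], hostBits => hostBits
  | _ :: rest, hostBits =>
      if r ≤ (2 : Int) ^ hostBits then hostBits
      else pvLoopA r rest (hostBits + 1)

-- the `while count <= n: append(s)` loops: n copies of s
def pvRepeat (s : String) : Nat → List String
  | 0 => []
  | n + 1 => s :: pvRepeat s n

def pvValidSubnetMasks : PySem.Dict String Int :=
  PySem.Dict.ofList [("11111111", 255), ("11111110", 254), ("11111100", 252),
    ("11111000", 248), ("11110000", 240), ("11100000", 224), ("11000000", 192),
    ("10000000", 128), ("00000000", 0)]

-- everything after the first loop, as a function of hostBits
def pvTailA (hostBits : Nat) : List String :=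
  let newOneBits := 32 - hostBits
  let subnetMaskBinary := pvRepeat "1" newOneBits ++ pvRepeat "0" hostBits
  let s := PySem.Str.join "" subnetMaskBinary
  let newSubnetMaskBinary :=
    [PySem.Str.slice s (some 0) (some 8), PySem.Str.slice s (some 8) (some 16),
     PySem.Str.slice s (some 16) (some 24), PySem.Str.slice s (some 24) (some 32)]
  let decimalMaskList := newSubnetMaskBinary.foldl
    (fun acc octet =>
      if pvValidSubnetMasks.contains octet then
        acc ++ [(pvValidSubnetMasks.get? octet).getD 0]
      else acc) ([] : List Int)
  decimalMaskList.map PySem.Int.toStr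

def getRequiredSubnetMask (reqNumHosts : Int) : List String :=
  pvTailA (pvLoopA reqNumHosts (PySem.List.pyRange 1 32 1) 1)

-- ===== PORT B =====
-- hostBits = 1 if r < 2 else min(32, (r-1).bit_length())
def pvHB (r : Int) : Nat :=
  if r < 2 then 1 else min 32 (PySem.Int.bitLength (r - 1))

-- mask = ((1 << (32-hostBits)) - 1) << hostBits; octets by shift-and-mask
def pvTailB (hostBits : Nat) : List String :=
  let mask : Int := (((1 : Int) <<< (32 - hostBits)) - 1) <<< hostBits
  [24, 16, 8, 0].map (fun sh => PySem.Int.toStr (PySem.Int.band (mask >>> sh) 255))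

def getRequiredSubnetMask_alt (reqNumHosts : Int) : List String :=
  pvTailB (pvHB reqNumHosts)

-- ===== PRECONDITION & SPEC =====
def Spec_getRequiredSubnetMask (reqNumHosts : Int) (out : List String) : Prop := out = getRequiredSubnetMask_alt reqNumHosts
instance (reqNumHosts : Int) (out : List String) : Decidable (Spec_getRequiredSubnetMask reqNumHosts out) := by unfold Spec_getRequiredSubnetMask; infer_instance

-- ===== CLAIM (what is proved, stated in full; the proofs are below) =====
def Claim_equal_getRequiredSubnetMask : Prop := ∀ (reqNumHosts : Int), Dom_getRequiredSubnetMask reqNumHosts → Spec_getRequiredSubnetMask reqNumHosts (getRequiredSubnetMask reqNumHosts)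

-- ===== LEMMAS AND PROOFS =====

lemma pvHB_one_le (r : Int) : 1 ≤ pvHB r := by
  unfold pvHB; split
  · exact le_refl 1
  · rename_i h
    have hlt := PySem.Int.lt_two_pow_bitLength (r - 1)
    by_contra hc
    have h0 : PySem.Int.bitLength (r - 1) = 0 := by omega
    rw [h0] at hlt
    simp at hlt
    omega

lemma pvHB_le_32 (r : Int) : pvHB r ≤ 32 := by
  unfold pvHB; split <;> omega

lemma pvHB_sat (r : Int) (hr : r ≤ 2147483648) : r ≤ (2 : Int) ^ pvHB r := by
  unfold pvHB; split
  · rename_i h; norm_num; omega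
  · rename_i h
    have hlt := PySem.Int.lt_two_pow_bitLength (r - 1)
    have hc : ((r - 1).natAbs : Int) = r - 1 := Int.natAbs_of_nonneg (by omega)
    -- bitLength (r-1) ≤ 31 inside the domain, so the min-with-32 cap is inert
    have hcap : PySem.Int.bitLength (r - 1) ≤ 31 := by
      by_contra hcc
      have h1 : r - 1 ≠ 0 := by omega
      have hle := PySem.Int.two_pow_bitLength_le (r - 1) h1
      have h31 : (2 : Nat) ^ 31 ≤ 2 ^ (PySem.Int.bitLength (r - 1) - 1) :=
        Nat.pow_le_pow_right (by norm_num) (by omega)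
      have hbig : 2147483648 ≤ (r - 1).natAbs := by
        have := le_trans h31 hle
        norm_num at this
        exact this
      omega
    rw [min_eq_right (by omega)]
    have hcast : (((2 : Nat) ^ PySem.Int.bitLength (r - 1) : Nat) : Int)
        = (2 : Int) ^ PySem.Int.bitLength (r - 1) := by push_cast; ring
    have h2' : ((r - 1).natAbs : Int) < (((2 : Nat) ^ PySem.Int.bitLength (r - 1) : Nat) : Int) := by
      exact_mod_cast hlt
    rw [hc, hcast] at h2'
    have h2 : r - 1 < (2 : Int) ^ PySem.Int.bitLength (r - 1) := h2' 
    linarith [Int.lt_iff_add_one_le.mp h2]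

lemma pvHB_min (r : Int) (k : Nat) (hk1 : 1 ≤ k) (hk : r ≤ (2 : Int) ^ k) : pvHB r ≤ k := by
  unfold pvHB; split
  · exact hk1
  · rename_i h
    have h1 : r - 1 ≠ 0 := by omega
    have hle := PySem.Int.two_pow_bitLength_le (r - 1) h1
    have hc : ((r - 1).natAbs : Int) = r - 1 := Int.natAbs_of_nonneg (by omega)
    have hcast : (((2 : Nat) ^ k : Nat) : Int) = (2 : Int) ^ k := by push_cast; ring
    have h2 : ((r - 1).natAbs : Int) < (((2 : Nat) ^ k : Nat) : Int) := by
      rw [hc, hcast]; linarith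
    have h3 : (r - 1).natAbs < 2 ^ k := by exact_mod_cast h2
    have hlt : (2 : Nat) ^ (PySem.Int.bitLength (r - 1) - 1) < 2 ^ k := lt_of_le_of_lt hle h3
    have := (Nat.pow_lt_pow_iff_right (a := 2) (by norm_num)).mp hlt
    omega

lemma pvLoopA_eq (r : Int) (hr : r ≤ 2147483648) :
    ∀ (l : List Int) (h : Nat), 1 ≤ h → h ≤ pvHB r → pvHB r ≤ h + l.length →
      pvLoopA r l h = pvHB r := by
  intro l
  induction l with
  | nil =>
      intro h h1 h2 h3
      simp [pvLoopA]
      simp at h3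
      omega
  | cons x rest ih =>
      intro h h1 h2 h3
      simp only [pvLoopA]
      split
      · rename_i hx
        have := pvHB_min r h h1 hx
        omega
      · rename_i hx
        push Not at hx
        have hsat := pvHB_sat r hr
        have hlt : h < pvHB r := by
          by_contra hc
          push Not at hc
          have : (2 : Int) ^ pvHB r ≤ 2 ^ h :=
            pow_le_pow_right₀ (by norm_num) hc
          omega
        exact ih (h + 1) (by omega) (by omega) (by simpa using by simp at h3; omega)

lemma pvTails_eq : ∀ h : Nat, h < 32 → pvTailA (h + 1) = pvTailB (h + 1) := by decide

-- ===== VERDICT (by name: the statement is the Claim_ definition above) =====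
theorem getRequiredSubnetMask_spec : Claim_equal_getRequiredSubnetMask := by
  intro r hdom
  unfold Spec_getRequiredSubnetMask getRequiredSubnetMask getRequiredSubnetMask_alt
  have hr : r ≤ 2147483648 := by
    simp [Dom_getRequiredSubnetMask, pvDomInt] at hdom
    omega
  have hlen : (PySem.List.pyRange 1 32 1).length = 31 := by decide
  have hloop : pvLoopA r (PySem.List.pyRange 1 32 1) 1 = pvHB r := by
    apply pvLoopA_eq r hr _ 1 (le_refl 1) (pvHB_one_le r)
    rw [hlen]
    have := pvHB_le_32 r
    omega
  rw [hloop]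
  have h1 := pvHB_one_le r
  have h2 := pvHB_le_32 r
  obtain ⟨k, hk⟩ : ∃ k, pvHB r = k + 1 := ⟨pvHB r - 1, by omega⟩
  rw [hk]
  exact pvTails_eq k (by omega)
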